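-- pv_equiv track=rewrite | github.com/fair-stack/datalab | app/app/fair_stack/instdb.py | get_dir_name
-- ===== SOURCE A (Python) =====
-- def get_dir_name(s):
--     '''
--      Role：Requires a file or folder name
--      parameters1：The string to truncate
--      Return：File or folder name
--     '''
--     dir_name = ""
--     k = 0
--     record = ""
--     for i in s:
--         if (record == " " and i != " "):
--             k = k + 1
--         if (k >= 3):
--             dir_name = dir_name + i
--         record = i
--     return dir_name
-- ===== SOURCE B (Python) =====
-- def get_dir_name(s):
--     '''
--      Role：Requires a file or folder name
--      parameters1：The string to truncate
--      Return：File or folder name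
--     '''
--     bounds = [i for i, (p, c) in enumerate(zip(s, s[1:]), 1) if p == " " and c != " "]
--     return s[bounds[2]:] if len(bounds) >= 3 else ""
-- ===== Notes on version B (the rewrite author's own statement) =====
-- stated objective: idiomatic
-- what changed: B first collects all space-to-non-space boundary indices (one comprehension over adjacent character pairs) and returns the slice of s from the 3rd such index, instead of A's stateful loop that accumulates the output one character at a time with a record/counter state machine.
import Mathlib
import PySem

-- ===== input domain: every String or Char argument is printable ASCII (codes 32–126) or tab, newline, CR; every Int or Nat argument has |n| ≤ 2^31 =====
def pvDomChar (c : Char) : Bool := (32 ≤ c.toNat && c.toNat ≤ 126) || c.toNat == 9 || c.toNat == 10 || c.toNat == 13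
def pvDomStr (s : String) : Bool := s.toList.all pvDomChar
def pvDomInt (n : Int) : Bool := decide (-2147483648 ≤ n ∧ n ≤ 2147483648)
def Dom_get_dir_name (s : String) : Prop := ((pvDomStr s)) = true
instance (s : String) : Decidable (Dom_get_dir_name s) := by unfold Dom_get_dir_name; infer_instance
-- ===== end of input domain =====

-- B locates the boundary indices first and returns one slice, instead of A's character-accumulating state machine (idiomatic; same O(n) cost).
-- ===== PORT A =====
-- state: (dir_name, k, record); record kept as List Char (Python string "" / single char)
def get_dir_name (s : String) : String :=
  let r := s.toList.foldl (fun (st : List Char × Int × List Char) (i : Char) =>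
    let dir := st.1
    let k := st.2.1
    let record := st.2.2
    let k := if record == [' '] && !(i == ' ') then k + 1 else k
    let dir := if 3 ≤ k then dir ++ [i] else dir
    (dir, k, [i])) (([] : List Char), (0 : Int), ([] : List Char))
  String.ofList r.1

-- ===== PORT B =====
def get_dir_name_alt (s : String) : String :=
  let cs := s.toList
  let bounds := ((PySem.List.enumerate (cs.zip (PySem.List.slice cs (some 1) none)) 1).filter
      (fun pc => pc.2.1 == ' ' && !(pc.2.2 == ' '))).map (·.1)
  if 3 ≤ bounds.length then String.ofList (PySem.List.slice cs (some (bounds.getD 2 0)) none)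
  else ""

-- ===== PRECONDITION & SPEC =====
def Spec_get_dir_name (s : String) (out : String) : Prop := out = get_dir_name_alt s
instance (s : String) (out : String) : Decidable (Spec_get_dir_name s out) := by unfold Spec_get_dir_name; infer_instance

-- ===== CLAIM (what is proved, stated in full; the proofs are below) =====
def Claim_equal_get_dir_name : Prop := ∀ (s : String), Dom_get_dir_name s → Spec_get_dir_name s (get_dir_name s)

-- ===== LEMMAS AND PROOFS =====

-- the fold step of port A, named for the proofs (definitionally the port's lambda)
def aStep (st : List Char × Int × List Char) (i : Char) : List Char × Int × List Char :=
  let dir := st.1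
  let k := st.2.1
  let record := st.2.2
  let k := if record == [' '] && !(i == ' ') then k + 1 else k
  let dir := if 3 ≤ k then dir ++ [i] else dir
  (dir, k, [i])

-- mediator: the suffix of t starting at the boundary that makes the count reach 3; b = "previous char was a space"
def specB (b : Bool) (k : Int) : List Char → List Char
  | [] => []
  | c :: rest =>
    let k' := if b && !(c == ' ') then k + 1 else k
    if 3 ≤ k' then c :: rest else specB (c == ' ') k' rest

-- boundary indices of t, previous char p, head of t carrying index i
def bAux : Char → Int → List Char → List Int
  | _, _, [] => []
  | p, i, c :: rest => (if p == ' ' && !(c == ' ') then [i] else []) ++ bAux c (i + 1) rest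

theorem foldA_step (st : List Char × Int × List Char) (i : Char) (t : List Char) :
    List.foldl aStep st (i :: t) = List.foldl aStep (aStep st i) t := rfl

theorem foldA_sat (t : List Char) : ∀ (dir rec : List Char) (k : Int), 3 ≤ k →
    (List.foldl aStep (dir, k, rec) t).1 = dir ++ t := by
  induction t with
  | nil => intro dir rec k hk; simp
  | cons c rest ih =>
    intro dir rec k hk
    rw [foldA_step]
    by_cases hb : (rec == [' '] && !(c == ' ')) = true
    · simp only [aStep, hb, if_true]
      rw [if_pos (by omega), ih _ _ _ (by omega)]
      simp
    · simp only [aStep, hb, if_false, Bool.false_eq_true]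
      rw [if_pos hk, ih _ _ _ hk]
      simp

theorem foldA_spec (t : List Char) : ∀ (dir rec : List Char) (k : Int),
    (List.foldl aStep (dir, k, rec) t).1 = dir ++ specB (rec == [' ']) k t := by
  induction t with
  | nil => intro dir rec k; simp [specB]
  | cons c rest ih =>
    intro dir rec k
    rw [foldA_step]
    simp only [aStep, specB]
    by_cases hb : (rec == [' '] && !(c == ' ')) = true
    · simp only [hb, if_true]
      by_cases h3 : (3 : Int) ≤ k + 1
      · rw [if_pos h3, if_pos h3, foldA_sat _ _ _ _ h3]; simp
      · rw [if_neg h3, if_neg h3, ih]; simp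
    · simp only [hb, if_false, Bool.false_eq_true]
      by_cases h3 : (3 : Int) ≤ k
      · rw [if_pos h3, if_pos h3, foldA_sat _ _ _ _ h3]; simp
      · rw [if_neg h3, if_neg h3, ih]; simp

theorem bAux_ge (t : List Char) : ∀ (p : Char) (i j : Int), j ∈ bAux p i t → i ≤ j := by
  induction t with
  | nil => intro p i j h; simp [bAux] at h
  | cons c rest ih =>
    intro p i j h
    simp only [bAux, List.mem_append] at h
    rcases h with h | h
    · split at h <;> simp at h; omega
    · have := ih c (i + 1) j h; omega

-- B's comprehension over enumerate(zip(...)) computes exactly bAux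
theorem enum_zip_bAux (t : List Char) : ∀ (p : Char) (i : Int),
    ((PySem.List.enumerate (List.zip (p :: t) t) i).filter
      (fun pc => pc.2.1 == ' ' && !(pc.2.2 == ' '))).map (·.1) = bAux p i t := by
  induction t with
  | nil => intro p i; simp [bAux]
  | cons c rest ih =>
    intro p i
    simp only [List.zip_cons_cons, PySem.List.enumerate_cons, List.filter_cons, bAux]
    rw [← ih c (i + 1)]
    by_cases hb : (p == ' ' && !(c == ' ')) = true <;> simp [hb]

-- main mediator lemma: specB is the suffix at the 3rd-counting boundary index
theorem specB_bAux (t : List Char) : ∀ (p : Char) (k i : Int), k < 3 →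
    specB (p == ' ') k t =
      match PySem.List.pyGet? (bAux p i t) (2 - k) with
      | some j => t.drop (j - i).toNat
      | none => [] := by
  induction t with
  | nil => intro p k i hk; simp [specB, bAux, PySem.List.pyGet?, PySem.List.pyIdx?]
  | cons c rest ih =>
    intro p k i hk
    simp only [specB, bAux]
    by_cases hb : (p == ' ' && !(c == ' ')) = true
    · simp only [hb, if_true]
      by_cases h3 : (3 : Int) ≤ k + 1
      · rw [if_pos h3, List.singleton_append]
        have e0 : (2 : Int) - k = ((0 : Nat) : Int) := by omega
        rw [e0, PySem.List.pyGet?_natCast]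
        simp
      · rw [if_neg h3, List.singleton_append, ih c (k + 1) (i + 1) (by omega)]
        have e1 : PySem.List.pyGet? (bAux c (i + 1) rest) (2 - (k + 1))
            = (bAux c (i + 1) rest)[(2 - (k + 1)).toNat]? :=
          PySem.List.pyGet?_of_nonneg _ (by omega)
        have e2 : PySem.List.pyGet? (i :: bAux c (i + 1) rest) (2 - k)
            = (bAux c (i + 1) rest)[(2 - (k + 1)).toNat]? := by
          rw [PySem.List.pyGet?_of_nonneg _ (by omega : (0:Int) ≤ 2 - k),
            (by omega : (2 - k).toNat = (2 - (k + 1)).toNat + 1), List.getElem?_cons_succ]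
        rw [e1, e2]
        cases hg : (bAux c (i + 1) rest)[(2 - (k + 1)).toNat]? with
        | none => rfl
        | some j =>
          have hj : i + 1 ≤ j := bAux_ge rest c (i + 1) j (List.mem_of_getElem? hg)
          simp only []
          rw [(by omega : (j - i).toNat = (j - (i + 1)).toNat + 1), List.drop_succ_cons]
    · simp only [hb, if_false, Bool.false_eq_true]
      rw [if_neg (by omega : ¬ (3:Int) ≤ k), List.nil_append, ih c k (i + 1) hk]
      have e1 : PySem.List.pyGet? (bAux c (i + 1) rest) (2 - k)
          = (bAux c (i + 1) rest)[(2 - k).toNat]? :=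
        PySem.List.pyGet?_of_nonneg _ (by omega)
      rw [e1]
      cases hg : (bAux c (i + 1) rest)[(2 - k).toNat]? with
      | none => rfl
      | some j =>
        have hj : i + 1 ≤ j := bAux_ge rest c (i + 1) j (List.mem_of_getElem? hg)
        simp only []
        rw [(by omega : (j - i).toNat = (j - (i + 1)).toNat + 1), List.drop_succ_cons]

-- ===== VERDICT (by name: the statement is the Claim_ definition above) =====
theorem get_dir_name_spec : Claim_equal_get_dir_name := by
  intro s _
  show String.ofList (List.foldl aStep (([] : List Char), (0 : Int), ([] : List Char)) s.toList).1 =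
    if 3 ≤ (((PySem.List.enumerate (s.toList.zip (PySem.List.slice s.toList (some 1) none)) 1).filter
        (fun pc => pc.2.1 == ' ' && !(pc.2.2 == ' '))).map (·.1)).length then
      String.ofList (PySem.List.slice s.toList
        (some ((((PySem.List.enumerate (s.toList.zip (PySem.List.slice s.toList (some 1) none)) 1).filter
          (fun pc => pc.2.1 == ' ' && !(pc.2.2 == ' '))).map (·.1)).getD 2 0)) none)
    else ""
  cases hcs : s.toList with
  | nil => simp
  | cons c0 t =>
    rw [PySem.List.slice_from_one]
    simp only [List.tail_cons]
    rw [enum_zip_bAux]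
    rw [foldA_step]
    have hstep : aStep (([] : List Char), (0 : Int), ([] : List Char)) c0
        = (([] : List Char), (0 : Int), [c0]) := by simp [aStep]
    rw [hstep, foldA_spec, List.nil_append]
    have hrec : (([c0] : List Char) == [' ']) = (c0 == ' ') := by simp
    rw [hrec, specB_bAux t c0 0 1 (by omega)]
    set bs := bAux c0 1 t with hbs
    by_cases hlen : 3 ≤ bs.length
    · rw [if_pos hlen]
      have h2 : 2 < bs.length := by omega
      have hget : PySem.List.pyGet? bs ((2 : Int) - 0) = some bs[2] := by
        rw [(by omega : (2 : Int) - 0 = ((2 : Nat) : Int)), PySem.List.pyGet?_natCast,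
          List.getElem?_eq_getElem h2]
      rw [hget]
      have hj : 1 ≤ bs[2] := bAux_ge t c0 1 bs[2] (List.getElem_mem _)
      have hgd : bs.getD 2 0 = bs[2] := by
        rw [List.getD_eq_getElem?_getD, List.getElem?_eq_getElem h2]; rfl
      rw [hgd, PySem.List.slice_from _ (by omega)]
      simp only []
      rw [(by omega : (bs[2]).toNat = (bs[2] - 1).toNat + 1), List.drop_succ_cons]
    · rw [if_neg hlen]
      have hget : PySem.List.pyGet? bs ((2 : Int) - 0) = none := by
        rw [(by omega : (2 : Int) - 0 = ((2 : Nat) : Int)), PySem.List.pyGet?_natCast,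
          List.getElem?_eq_none_iff.mpr (by omega)]
      rw [hget]
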